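-- pv_equiv track=rewrite | github.com/cid2rrrr/DRUMMM | modules/LR_assign.py | separate_cc
-- ===== SOURCE A (Python) =====
-- def separate_cc(prd_cls):
--     transformed_prd_cls = []
--     for i, cls in enumerate(prd_cls):
--         spl = cls.split('+')
--         new_element = []
--
--         for s in spl:
--             if s == 'C':
--                 if (i > 0 and any(keyword in prd_cls[i - 1] for keyword in ['R', 'MT', 'FT'])) or (i < len(prd_cls)-1 and any(keyword in prd_cls[i + 1] for keyword in ['R', 'MT', 'FT'])):
--                     new_element.append('CC_R')
--                 else:
--                     new_element.append('CC_L')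
--             else:
--                 new_element.append(s)
--
--         transformed_prd_cls.append('+'.join(new_element))
--
--     return transformed_prd_cls
-- ===== SOURCE B (Python) =====
-- def separate_cc(prd_cls):
--     # Streaming one-element-delay pipeline: each element is held as "pending"
--     # together with its left neighbour's keyword flag, and emitted once its
--     # right neighbour arrives (or at the end); no indexing into the list.
--     def kw(s):
--         return 'R' in s or 'MT' in s or 'FT' in s
--
--     def emit(elem, flag):
--         rep = 'CC_R' if flag else 'CC_L'
--         return '+'.join(rep if t == 'C' else t for t in elem.split('+'))
--
--     out = []
--     pending = None
--     prev_flag = False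
--     for cur in prd_cls:
--         if pending is not None:
--             elem, lflag = pending
--             out.append(emit(elem, lflag or kw(cur)))
--         pending = (cur, prev_flag)
--         prev_flag = kw(cur)
--     if pending is not None:
--         elem, lflag = pending
--         out.append(emit(elem, lflag))
--     return out
-- ===== Notes on version B (the rewrite author's own statement) =====
-- stated objective: alternative
-- what changed: B is a streaming one-element-delay pipeline: it folds over the list holding one pending element paired with its left neighbour's R/MT/FT flag and emits it only when its right neighbour arrives (flushing the last pending element at the end), instead of A's index-driven loop that re-scans prd_cls[i-1]/prd_cls[i+1] for every 'C' token.
import Mathlib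
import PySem

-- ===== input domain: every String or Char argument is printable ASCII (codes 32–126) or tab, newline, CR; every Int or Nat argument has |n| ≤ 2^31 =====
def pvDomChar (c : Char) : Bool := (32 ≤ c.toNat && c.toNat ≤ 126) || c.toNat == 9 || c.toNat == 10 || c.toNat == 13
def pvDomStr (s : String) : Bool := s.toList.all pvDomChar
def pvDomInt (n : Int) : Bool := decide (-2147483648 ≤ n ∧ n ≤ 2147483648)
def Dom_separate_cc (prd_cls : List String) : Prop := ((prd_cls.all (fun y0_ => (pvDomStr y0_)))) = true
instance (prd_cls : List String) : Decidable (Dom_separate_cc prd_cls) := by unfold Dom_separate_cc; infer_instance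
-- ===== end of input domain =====

-- B replaces A's index-driven loop (which re-scans prd_cls[i-1]/prd_cls[i+1] per 'C' token)
-- by a streaming one-element-delay pipeline threading neighbour flags (objective: alternative).

-- ===== PORT A =====
-- any(keyword in t for keyword in ['R', 'MT', 'FT'])
def pvAnyKW (t : String) : Bool :=
  (["R", "MT", "FT"]).any (fun keyword => PySem.Str.isIn keyword t)

-- cls.split('+'): '+' is a non-empty separator, so Python never raises; split? is some here
def separate_cc (prd_cls : List String) : List String :=
  (PySem.List.enumerate prd_cls).foldl (fun transformed_prd_cls p =>
    let i := p.1
    let cls := p.2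
    let spl := (PySem.Str.split? cls "+").getD []
    let new_element := spl.foldl (fun ne s =>
      if s = "C" then
        if (decide (0 < i) && pvAnyKW (PySem.List.pyGetD prd_cls (i - 1) "")) ||
           (decide (i < (prd_cls.length : Int) - 1) && pvAnyKW (PySem.List.pyGetD prd_cls (i + 1) "")) then
          ne ++ ["CC_R"]
        else
          ne ++ ["CC_L"]
      else
        ne ++ [s]) []
    transformed_prd_cls ++ [PySem.Str.join "+" new_element]) []

-- ===== PORT B =====
-- 'R' in s or 'MT' in s or 'FT' in s
def pvKw (s : String) : Bool :=
  PySem.Str.isIn "R" s || PySem.Str.isIn "MT" s || PySem.Str.isIn "FT" s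

-- emit(elem, flag)
def pvEmit (elem : String) (flag : Bool) : String :=
  let rep := if flag then "CC_R" else "CC_L"
  PySem.Str.join "+" (((PySem.Str.split? elem "+").getD []).map (fun t => if t = "C" then rep else t))

-- one iteration of B's loop; state = (out, pending, prev_flag)
def pvStepB (st : List String × Option (String × Bool) × Bool) (cur : String) :
    List String × Option (String × Bool) × Bool :=
  let out := match st.2.1 with
    | some (elem, lflag) => st.1 ++ [pvEmit elem (lflag || pvKw cur)]
    | none => st.1
  (out, some (cur, st.2.2), pvKw cur)

def separate_cc_alt (prd_cls : List String) : List String :=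
  let st := prd_cls.foldl pvStepB ([], none, false)
  match st.2.1 with
  | some (elem, lflag) => st.1 ++ [pvEmit elem lflag]
  | none => st.1

-- ===== PRECONDITION & SPEC =====
def Spec_separate_cc (prd_cls : List String) (out : List String) : Prop := out = separate_cc_alt prd_cls
instance (prd_cls : List String) (out : List String) : Decidable (Spec_separate_cc prd_cls out) := by unfold Spec_separate_cc; infer_instance

-- ===== CLAIM (what is proved, stated in full; the proofs are below) =====
def Claim_equal_separate_cc : Prop := ∀ (prd_cls : List String), Dom_separate_cc prd_cls → Spec_separate_cc prd_cls (separate_cc prd_cls)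

-- ===== LEMMAS AND PROOFS =====

-- proof-side sliding-window spec: prev = keyword flag of the element before the list
def pvGo (prev : Bool) : List String → List String
  | [] => []
  | cur :: tail =>
    pvEmit cur (prev || (!tail.isEmpty && pvKw (tail.headD ""))) :: pvGo (pvKw cur) tail

-- A's neighbour condition at index i
def pvCondA (prd_cls : List String) (i : Int) : Bool :=
  (decide (0 < i) && pvAnyKW (PySem.List.pyGetD prd_cls (i - 1) "")) ||
  (decide (i < (prd_cls.length : Int) - 1) && pvAnyKW (PySem.List.pyGetD prd_cls (i + 1) ""))

theorem pvAnyKW_eq_pvKw (s : String) : pvAnyKW s = pvKw s := by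
  simp [pvAnyKW, pvKw, Bool.or_assoc]

theorem separate_cc_eq_map (prd_cls : List String) :
    separate_cc prd_cls =
      (PySem.List.enumerate prd_cls).map (fun p => pvEmit p.2 (pvCondA prd_cls p.1)) := by
  unfold separate_cc
  rw [show (fun (transformed_prd_cls : List String) (p : Int × String) =>
        let i := p.1
        let cls := p.2
        let spl := (PySem.Str.split? cls "+").getD []
        let new_element := spl.foldl (fun ne s =>
          if s = "C" then
            if (decide (0 < i) && pvAnyKW (PySem.List.pyGetD prd_cls (i - 1) "")) ||
               (decide (i < (prd_cls.length : Int) - 1) && pvAnyKW (PySem.List.pyGetD prd_cls (i + 1) "")) then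
              ne ++ ["CC_R"]
            else
              ne ++ ["CC_L"]
          else
            ne ++ [s]) []
        transformed_prd_cls ++ [PySem.Str.join "+" new_element])
      = (fun acc p => acc ++ [pvEmit p.2 (pvCondA prd_cls p.1)]) from by
    funext acc p
    show acc ++ _ = acc ++ _
    congr 1
    rw [show (fun (ne : List String) s =>
          if s = "C" then
            if (decide (0 < p.1) && pvAnyKW (PySem.List.pyGetD prd_cls (p.1 - 1) "")) ||
               (decide (p.1 < (prd_cls.length : Int) - 1) && pvAnyKW (PySem.List.pyGetD prd_cls (p.1 + 1) "")) then
              ne ++ ["CC_R"]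
            else
              ne ++ ["CC_L"]
          else
            ne ++ [s])
        = (fun ne s => ne ++ [if s = "C" then (if pvCondA prd_cls p.1 then "CC_R" else "CC_L") else s]) from by
      funext ne s; unfold pvCondA; split_ifs <;> rfl]
    rw [PySem.List.foldl_append_singleton_eq_map]
    simp [pvEmit]]
  rw [PySem.List.foldl_append_singleton_eq_map]
  simp

-- B's fold, started with a pending element whose own flag is lflag, flushes to pvGo
theorem pvFoldB_char (xs : List String) (out : List String) (elem : String) (lflag : Bool) :
    (let st := xs.foldl pvStepB (out, some (elem, lflag), pvKw elem)
     match st.2.1 with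
     | some (e, l) => st.1 ++ [pvEmit e l]
     | none => st.1)
    = out ++ pvGo lflag (elem :: xs) := by
  induction xs generalizing out elem lflag with
  | nil => simp [pvGo]
  | cons cur tail ih =>
    show (let st := tail.foldl pvStepB (pvStepB (out, some (elem, lflag), pvKw elem) cur)
          match st.2.1 with
          | some (e, l) => st.1 ++ [pvEmit e l]
          | none => st.1) = _
    rw [show pvStepB (out, some (elem, lflag), pvKw elem) cur
        = (out ++ [pvEmit elem (lflag || pvKw cur)], some (cur, pvKw elem), pvKw cur) from rfl]
    rw [ih]
    simp [pvGo]

theorem separate_cc_alt_eq_pvGo (xs : List String) : separate_cc_alt xs = pvGo false xs := by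
  cases xs with
  | nil => rfl
  | cons x rest =>
    show (let st := rest.foldl pvStepB (pvStepB ([], none, false) x)
          match st.2.1 with
          | some (e, l) => st.1 ++ [pvEmit e l]
          | none => st.1) = _
    rw [show pvStepB ([], none, false) x = ([], some (x, false), pvKw x) from rfl]
    rw [pvFoldB_char rest [] x false]
    simp

theorem pvGo_length (prev : Bool) (xs : List String) : (pvGo prev xs).length = xs.length := by
  induction xs generalizing prev with
  | nil => rfl
  | cons cur tail ih => simp [pvGo, ih]

-- the window condition pvGo uses at position i, expressed against the whole list
theorem pvGo_getElem (xs : List String) (prev : Bool) (i : Nat)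
    (h : i < xs.length) (h2 : i < (pvGo prev xs).length) :
    (pvGo prev xs)[i] =
      pvEmit xs[i] ((if i = 0 then prev else pvKw (xs.getD (i - 1) "")) ||
              (decide (i + 1 < xs.length) && pvKw (xs.getD (i + 1) ""))) := by
  induction xs generalizing prev i with
  | nil => simp at h
  | cons cur tail ih =>
    cases i with
    | zero =>
      show _ = pvEmit cur (prev || _)
      cases tail with
      | nil => simp [pvGo]
      | cons b t => simp [pvGo]
    | succ j =>
      have hj : j < tail.length := by simpa using h
      have hj2 : j < (pvGo (pvKw cur) tail).length := by rw [pvGo_length]; exact hj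
      show (pvGo (pvKw cur) tail)[j] = _
      rw [ih (pvKw cur) j hj hj2, List.getElem_cons_succ]
      congr 1
      have hdec : decide (j + 1 + 1 < (cur :: tail).length) = decide (j + 1 < tail.length) :=
        decide_eq_decide.mpr (by simp only [List.length_cons]; omega)
      have hgd : (cur :: tail).getD (j + 1 + 1) "" = tail.getD (j + 1) "" := rfl
      rw [hgd, hdec]
      cases j with
      | zero => simp [List.getD]
      | succ k => simp [List.getD]

theorem pvCondA_eq (xs : List String) (i : Nat) (h : i < xs.length) :
    pvCondA xs (i : Int) =
      ((if i = 0 then false else pvKw (xs.getD (i - 1) "")) ||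
       (decide (i + 1 < xs.length) && pvKw (xs.getD (i + 1) ""))) := by
  unfold pvCondA
  have hleft : (decide ((0:Int) < (i:Int)) && pvAnyKW (PySem.List.pyGetD xs ((i:Int) - 1) ""))
      = (if i = 0 then false else pvKw (xs.getD (i - 1) "")) := by
    cases i with
    | zero => simp
    | succ j =>
      have : ((j+1 : Nat) : Int) - 1 = ((j : Nat) : Int) := by push_cast; ring
      rw [this, PySem.List.pyGetD_natCast]
      simp [pvAnyKW_eq_pvKw]
  have hright : (decide ((i:Int) < (xs.length : Int) - 1) && pvAnyKW (PySem.List.pyGetD xs ((i:Int) + 1) ""))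
      = (decide (i + 1 < xs.length) && pvKw (xs.getD (i + 1) "")) := by
    have : ((i : Nat) : Int) + 1 = ((i+1 : Nat) : Int) := by push_cast; ring
    rw [this, PySem.List.pyGetD_natCast]
    have hdec : decide ((i:Int) < (xs.length : Int) - 1) = decide (i + 1 < xs.length) := by
      by_cases hc : i + 1 < xs.length <;> simp [hc] <;> omega
    rw [hdec, pvAnyKW_eq_pvKw]
  rw [hleft, hright]

-- ===== VERDICT (by name: the statement is the Claim_ definition above) =====
theorem separate_cc_spec : Claim_equal_separate_cc := by
  intro xs _
  show separate_cc xs = separate_cc_alt xs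
  rw [separate_cc_eq_map, separate_cc_alt_eq_pvGo]
  apply List.ext_getElem
  · simp [pvGo_length, PySem.List.length_enumerate]
  · intro i h1 h2
    simp only [List.length_map, PySem.List.length_enumerate] at h1
    rw [pvGo_getElem xs false i h1 h2]
    simp only [List.getElem_map, PySem.List.getElem_enumerate]
    rw [show (0 : Int) + (i : Int) = (i : Int) by ring]
    rw [pvCondA_eq xs i h1]
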